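-- pv_equiv track=rewrite | github.com/DevikaReddi/Switch-scheduling | switch_simulation.py | _all_matchings
-- ===== SOURCE A (Python) =====
-- N = 3           # switch dimensions (3x3)
--
-- def _all_matchings(voq):
--     avail = [(i, j) for i in range(N) for j in range(N) if voq[i][j]]
--     result = []
--
--     def backtrack(idx, used_i, used_o, cur):
--         if cur:
--             result.append(tuple(cur))
--         for k in range(idx, len(avail)):
--             ii, jj = avail[k]
--             if ii not in used_i and jj not in used_o:
--                 cur.append((ii, jj))
--                 backtrack(k + 1, used_i | {ii}, used_o | {jj}, cur)
--                 cur.pop()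
--
--     backtrack(0, set(), set(), [])
--     return result or [()]
-- ===== SOURCE B (Python) =====
-- N = 3           # switch dimensions (3x3)
--
-- def _all_matchings(voq):
--     # Generate-filter-sort instead of pruned DFS backtracking:
--     # enumerate every nonempty subset of the available edges by bitmask,
--     # keep the subsets that are valid matchings, sort lexicographically.
--     avail = [(i, j) for i in range(N) for j in range(N) if voq[i][j]]
--     m = len(avail)
--     out = []
--     for mask in range(1, 1 << m):
--         pairs = tuple(avail[k] for k in range(m) if (mask >> k) & 1)
--         if len({i for i, _ in pairs}) == len(pairs) and \
--            len({j for _, j in pairs}) == len(pairs):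
--             out.append(pairs)
--     out.sort()
--     return out or [()]
-- ===== Notes on version B (the rewrite author's own statement) =====
-- stated objective: alternative
-- what changed: Replaces the pruned DFS backtracking (recursion with used-row/used-column sets, emitting matchings in pre-order) by a brute-force generate-filter-sort pass: enumerate every nonempty subset of the available edges by bitmask, keep those with no repeated row or column, and sort the result lexicographically.
-- outside the precondition, e.g. on _all_matchings([[1, 0], [0, 1]]): A raises IndexError, B raises IndexError
import Mathlib
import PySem

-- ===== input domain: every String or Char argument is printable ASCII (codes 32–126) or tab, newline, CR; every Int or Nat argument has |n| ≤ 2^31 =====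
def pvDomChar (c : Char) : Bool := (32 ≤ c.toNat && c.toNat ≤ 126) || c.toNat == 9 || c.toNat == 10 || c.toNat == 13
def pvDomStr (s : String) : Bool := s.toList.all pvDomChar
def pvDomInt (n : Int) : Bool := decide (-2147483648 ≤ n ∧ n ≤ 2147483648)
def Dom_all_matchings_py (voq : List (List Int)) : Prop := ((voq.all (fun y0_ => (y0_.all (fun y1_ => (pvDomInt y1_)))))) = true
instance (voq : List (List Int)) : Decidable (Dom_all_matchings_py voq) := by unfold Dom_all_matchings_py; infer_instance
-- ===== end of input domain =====

-- B replaces A's pruned DFS backtracking by brute-force bitmask subset enumeration,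
-- a validity filter and a lexicographic sort (objective: alternative algorithm).

-- ===== PORT A =====
-- avail = [(i, j) for i in range(N) for j in range(N) if voq[i][j]]  (N = 3);
-- shared by both ports (A's and B's Python build avail by the same comprehension).
-- voq[i][j] is ported with pyGetD; Pre_ keeps exactly the in-range inputs.
def pvAvail (voq : List (List Int)) : List (Int × Int) :=
  (PySem.List.pyRange 0 3 1).flatMap (fun i =>
    (PySem.List.pyRange 0 3 1).filterMap (fun j =>
      if (PySem.List.pyGetD (PySem.List.pyGetD voq i []) j 0) != 0 then some (i, j) else none))

-- backtrack(idx, used_i, used_o, cur): recursion over the suffix of avail from idx;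
-- each recursive call first emits its (nonempty) cur, then loops over later edges.
def pvBT : List (Int × Int) → PySem.Set Int → PySem.Set Int → List (Int × Int) → List (List (Int × Int))
  | [], _, _, _ => []
  | (ii, jj) :: rs, ui, uo, cur =>
    (if !(PySem.Set.contains ui ii) && !(PySem.Set.contains uo jj) then
      (cur ++ [(ii, jj)]) :: pvBT rs (PySem.Set.add ui ii) (PySem.Set.add uo jj) (cur ++ [(ii, jj)])
    else []) ++ pvBT rs ui uo cur

def pvFinishA (avail : List (Int × Int)) : List (List (Int × Int)) :=
  let result := pvBT avail PySem.Set.empty PySem.Set.empty []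
  if result.isEmpty then [[]] else result    -- return result or [()]

def all_matchings_py (voq : List (List Int)) : List (List (Int × Int)) :=
  pvFinishA (pvAvail voq)

-- ===== PORT B =====
-- Python's comparison of tuples of int-pairs, ported by hand (exact: tuple comparison
-- in Python is lexicographic, shorter prefix first, components compared in order).
def pvLexLt : List (Int × Int) → List (Int × Int) → Bool
  | [], [] => false
  | [], _ :: _ => true
  | _ :: _, [] => false
  | a :: as_, b :: bs =>
    if a.1 < b.1 then true else if b.1 < a.1 then false
    else if a.2 < b.2 then true else if b.2 < a.2 then false
    else pvLexLt as_ bs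

-- out.sort(): a stable insertion sort by pvLexLt (exact: Python's sort is stable and
-- compares these lists of int-pairs exactly as pvLexLt does).
def pvInsert (x : List (Int × Int)) : List (List (Int × Int)) → List (List (Int × Int))
  | [] => [x]
  | y :: ys => if pvLexLt x y then x :: y :: ys else y :: pvInsert x ys

def pvSort (l : List (List (Int × Int))) : List (List (Int × Int)) :=
  l.foldl (fun acc x => pvInsert x acc) []

-- len({i for i,_ in pairs}) == len(pairs) and len({j for _,j in pairs}) == len(pairs)
def pvValid (pairs : List (Int × Int)) : Bool :=
  PySem.Set.len (PySem.Set.ofList (pairs.map Prod.fst)) == pairs.length &&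
  PySem.Set.len (PySem.Set.ofList (pairs.map Prod.snd)) == pairs.length

-- for mask in range(1, 1 << m): pairs = (avail[k] for k in range(m) if (mask >> k) & 1)
-- (the k-loop over range(m) with avail[k] is ported via enumerate, and (mask >> k) & 1 with
-- Nat bit operations — exact since every mask drawn from range(1, 1 << m) is positive)
def pvCollect (avail : List (Int × Int)) : List (List (Int × Int)) :=
  (PySem.List.pyRange 1 (2 ^ avail.length) 1).foldl (fun out mask =>
    let pairs := (PySem.List.enumerate avail 0).filterMap (fun kv =>
      if mask.toNat >>> kv.1.toNat &&& 1 == 1 then some kv.2 else none)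
    if pvValid pairs then out ++ [pairs] else out) []

def pvFinishB (avail : List (Int × Int)) : List (List (Int × Int)) :=
  let out := pvSort (pvCollect avail)
  if out.isEmpty then [[]] else out    -- return out or [()]

def all_matchings_py_alt (voq : List (List Int)) : List (List (Int × Int)) :=
  pvFinishB (pvAvail voq)

-- ===== PRECONDITION & SPEC =====
-- Python A indexes voq[i][j] for i, j in range(3): it raises IndexError unless voq has
-- at least 3 rows whose first 3 rows each have at least 3 entries.
def Pre_all_matchings_py (voq : List (List Int)) : Prop :=
  3 ≤ voq.length ∧ ((voq.take 3).all (fun r => decide (3 ≤ r.length))) = true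
instance (voq : List (List Int)) : Decidable (Pre_all_matchings_py voq) := by unfold Pre_all_matchings_py; infer_instance

def pvWitness_all_matchings_py : List (List Int) := [[1, 0, 0], [0, 1, 0], [0, 0, 1]]

def Spec_all_matchings_py (voq : List (List Int)) (out : List (List (Int × Int))) : Prop := out = all_matchings_py_alt voq
instance (voq : List (List Int)) (out : List (List (Int × Int))) : Decidable (Spec_all_matchings_py voq out) := by unfold Spec_all_matchings_py; infer_instance

-- ===== CLAIM (what is proved, stated in full; the proofs are below) =====
def Claim_equal_all_matchings_py : Prop := ∀ (voq : List (List Int)), Dom_all_matchings_py voq → Pre_all_matchings_py voq → Spec_all_matchings_py voq (all_matchings_py voq)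

-- ===== LEMMAS AND PROOFS =====

-- avail as a function of the nine truth values voq[i][j] ≠ 0
def pvMk (b00 b01 b02 b10 b11 b12 b20 b21 b22 : Bool) : List (Int × Int) :=
  (if b00 then [((0:Int), (0:Int))] else []) ++ (if b01 then [(0, 1)] else []) ++ (if b02 then [(0, 2)] else []) ++
  (if b10 then [(1, 0)] else []) ++ (if b11 then [(1, 1)] else []) ++ (if b12 then [(1, 2)] else []) ++
  (if b20 then [(2, 0)] else []) ++ (if b21 then [(2, 1)] else []) ++ (if b22 then [(2, 2)] else [])

def pvBit (voq : List (List Int)) (i j : Int) : Bool :=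
  (PySem.List.pyGetD (PySem.List.pyGetD voq i []) j 0) != 0

lemma pvRow (voq : List (List Int)) (i : Int) :
    List.filterMap (fun j =>
      if (PySem.List.pyGetD (PySem.List.pyGetD voq i []) j 0) != 0 then some (i, j) else none) [0, 1, 2] =
    (if pvBit voq i 0 then [(i, (0:Int))] else []) ++ (if pvBit voq i 1 then [(i, 1)] else []) ++
    (if pvBit voq i 2 then [(i, 2)] else []) := by
  unfold pvBit
  cases h0 : (PySem.List.pyGetD (PySem.List.pyGetD voq i []) 0 0) != 0 <;>
  cases h1 : (PySem.List.pyGetD (PySem.List.pyGetD voq i []) 1 0) != 0 <;>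
  cases h2 : (PySem.List.pyGetD (PySem.List.pyGetD voq i []) 2 0) != 0 <;>
  simp at h0 h1 h2 <;> simp [h0, h1, h2]

lemma pvAvail_eq (voq : List (List Int)) :
    pvAvail voq = pvMk (pvBit voq 0 0) (pvBit voq 0 1) (pvBit voq 0 2)
      (pvBit voq 1 0) (pvBit voq 1 1) (pvBit voq 1 2)
      (pvBit voq 2 0) (pvBit voq 2 1) (pvBit voq 2 2) := by
  unfold pvAvail pvMk
  rw [show PySem.List.pyRange 0 3 1 = [0, 1, 2] from rfl]
  simp only [List.flatMap_cons, List.flatMap_nil, List.append_nil]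
  rw [pvRow voq 0, pvRow voq 1, pvRow voq 2]
  simp only [List.append_assoc]

-- the two algorithms agree on every one of the 512 possible avail lists
set_option maxHeartbeats 1600000 in
set_option maxRecDepth 100000 in
lemma pvMain : ∀ b00 b01 b02 b10 b11 b12 b20 b21 b22 : Bool,
    pvFinishA (pvMk b00 b01 b02 b10 b11 b12 b20 b21 b22) =
    pvFinishB (pvMk b00 b01 b02 b10 b11 b12 b20 b21 b22) := by decide

-- ===== VERDICT (by name: the statement is the Claim_ definition above) =====
theorem all_matchings_py_spec : Claim_equal_all_matchings_py := by
  intro voq _ _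
  unfold Spec_all_matchings_py all_matchings_py all_matchings_py_alt
  rw [pvAvail_eq]
  exact pvMain _ _ _ _ _ _ _ _ _
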